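-- pv_equiv track=rewrite | github.com/koii-network/builder-test | src/unique_substrings.py | find_unique_substrings
-- ===== SOURCE A (Python) =====
-- def find_unique_substrings(input_string):
--     """
--     Find all unique substrings within the given input string.
--
--     Args:
--         input_string (str): The input string to find substrings from.
--
--     Returns:
--         list: A list of unique substrings from the input string.
--
--     Raises:
--         TypeError: If the input is not a string.
--     """
--     # Validate input type
--     if not isinstance(input_string, str):
--         raise TypeError("Input must be a string")
--
--     # If input is empty, return an empty list
--     if not input_string:
--         return []
--
--     # Use a set to store unique substrings
--     unique_substrings = set()
--
--     # Generate all possible substrings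
--     for start in range(len(input_string)):
--         for end in range(start + 1, len(input_string) + 1):
--             unique_substrings.add(input_string[start:end])
--
--     # Convert set to sorted list for consistent output
--     return sorted(list(unique_substrings))
-- ===== SOURCE B (Python) =====
-- def find_unique_substrings(input_string):
--     """Collect every distinct substring by inserting all suffixes into a trie:
--     each trie node created corresponds to exactly one distinct non-empty
--     substring, recorded at creation time, so no dedup pass is needed."""
--     if not isinstance(input_string, str):
--         raise TypeError("Input must be a string")
--     if not input_string:
--         return []
--     children = {}   # (node_id, ch) -> child node id; node 0 is the root
--     words = []      # words[i-1] = the substring spelled by the path to node i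
--     next_id = 1
--     for start in range(len(input_string)):
--         node = 0
--         cur = ""
--         for ch in input_string[start:]:
--             cur += ch
--             nxt = children.get((node, ch))
--             if nxt is None:
--                 nxt = next_id
--                 next_id += 1
--                 children[(node, ch)] = nxt
--                 words.append(cur)
--             node = nxt
--     return sorted(words)
-- ===== Notes on version B (the rewrite author's own statement) =====
-- stated objective: alternative
-- what changed: A slices out all O(n^2) substrings and dedups them in a set before sorting; B instead inserts every suffix of the input into a trie keyed by (node, char), recording the path string once at the moment each trie node is created, so each distinct substring is produced exactly once and only the final sort remains.
import Mathlib
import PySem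

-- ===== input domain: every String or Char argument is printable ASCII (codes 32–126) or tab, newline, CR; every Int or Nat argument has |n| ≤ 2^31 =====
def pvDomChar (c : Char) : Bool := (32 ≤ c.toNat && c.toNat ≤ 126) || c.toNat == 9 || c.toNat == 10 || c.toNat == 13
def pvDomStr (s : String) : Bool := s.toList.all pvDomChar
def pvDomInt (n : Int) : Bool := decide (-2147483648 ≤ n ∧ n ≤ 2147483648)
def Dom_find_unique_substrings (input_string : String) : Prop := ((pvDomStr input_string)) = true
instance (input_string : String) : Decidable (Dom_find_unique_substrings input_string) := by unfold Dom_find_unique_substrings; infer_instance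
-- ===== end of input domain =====

-- B replaces A's quadratic generate-all-slices-into-a-set pass by inserting every suffix
-- into a trie, recording each newly created node's path string, then sorting those words.


-- ===== PORT A =====
-- literal transliteration of A: collect every slice s[start:end] into a set, return sorted(list(set)).
def find_unique_substrings (input_string : String) : List String :=
  if input_string.toList = [] then []
  else
    let n : Int := PySem.Str.len input_string
    let uniq : PySem.Set String :=
      (PySem.List.pyRange 0 n).foldl (fun u st =>
        (PySem.List.pyRange (st + 1) (n + 1)).foldl (fun u en =>
          u.add (PySem.Str.slice input_string (some st) (some en))) u)
        PySem.Set.empty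
    PySem.List.sorted uniq (fun x => x)

-- ===== PORT B =====
-- one trie-insertion step for one character (Source B's inner-loop body); state is
-- (children, words, next_id, node, cur); Python's str cur is carried as List Char.
def altInner (s : PySem.Dict (Int × Char) Int × List (List Char) × Int × Int × List Char)
    (ch : Char) : PySem.Dict (Int × Char) Int × List (List Char) × Int × Int × List Char :=
  match s with
  | (children, words, next_id, node, cur0) =>
    let cur := cur0 ++ [ch]
    match children.get? (node, ch) with
    | some nxt => (children, words, next_id, nxt, cur)
    | none => (children.insert (node, ch) next_id, words ++ [cur], next_id + 1, next_id, cur)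

-- Source B's outer-loop body: insert the whole suffix input_string[start:] into the trie,
-- starting the walk at the root with the empty current word
def outerF (input_string : String)
    (acc : PySem.Dict (Int × Char) Int × List (List Char) × Int) (start : Int) :
    PySem.Dict (Int × Char) Int × List (List Char) × Int :=
  let r := (PySem.Str.slice input_string (some start) none).toList.foldl altInner
    (acc.1, acc.2.1, acc.2.2, 0, ([] : List Char))
  (r.1, r.2.1, r.2.2.1)

def find_unique_substrings_alt (input_string : String) : List String :=
  if input_string.toList = [] then []
  else
    let n : Int := PySem.Str.len input_string
    let fin := (PySem.List.pyRange 0 n).foldl (outerF input_string)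
      ((PySem.Dict.empty : PySem.Dict (Int × Char) Int), ([] : List (List Char)), (1 : Int))
    PySem.List.sorted (fin.2.1.map String.ofList) (fun x => x)

-- ===== PRECONDITION & SPEC =====
def Spec_find_unique_substrings (input_string : String) (out : List String) : Prop := out = find_unique_substrings_alt input_string
instance (input_string : String) (out : List String) : Decidable (Spec_find_unique_substrings input_string out) := by unfold Spec_find_unique_substrings; infer_instance

-- ===== CLAIM (what is proved, stated in full; the proofs are below) =====
def Claim_equal_find_unique_substrings : Prop := ∀ (input_string : String), Dom_find_unique_substrings input_string → Spec_find_unique_substrings input_string (find_unique_substrings input_string)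

-- ===== LEMMAS AND PROOFS =====

-- the word spelled by the path from the root to node i (node 0 = root, node i ≥ 1 was the
-- i-th node created and carries words[i-1])
def nodeWord (ws : List (List Char)) (i : Int) : List Char :=
  if i = 0 then [] else ws.getD (i - 1).toNat []

-- invariant of B's trie state
def TrieInv (d : PySem.Dict (Int × Char) Int) (ws : List (List Char)) : Prop :=
  (∀ p c j, d.get? (p, c) = some j →
      0 ≤ p ∧ p ≤ (ws.length : Int) ∧ 1 ≤ j ∧ j ≤ (ws.length : Int) ∧
      nodeWord ws j = nodeWord ws p ++ [c]) ∧
  ws.Nodup ∧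
  (∀ w ∈ ws, w ≠ []) ∧
  (∀ p c, 0 ≤ p → p ≤ (ws.length : Int) →
      ((d.get? (p, c)).isSome ↔ nodeWord ws p ++ [c] ∈ ws)) ∧
  (∀ w ∈ ws, w.dropLast ∈ ws ∨ w.dropLast = [])

lemma nodeWord_mem (ws : List (List Char)) (i : Int) (h1 : 1 ≤ i) (h2 : i ≤ (ws.length : Int)) :
    nodeWord ws i ∈ ws := by
  have hne : i ≠ 0 := by omega
  have hlt : (i - 1).toNat < ws.length := by omega
  simp only [nodeWord, if_neg hne, List.getD_eq_getElem _ _ hlt]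
  exact List.getElem_mem hlt

lemma nodeWord_inj (ws : List (List Char)) (hnd : ws.Nodup) (hne : ∀ w ∈ ws, w ≠ [])
    (i j : Int) (hi0 : 0 ≤ i) (hi1 : i ≤ (ws.length : Int)) (hj0 : 0 ≤ j)
    (hj1 : j ≤ (ws.length : Int)) (h : nodeWord ws i = nodeWord ws j) : i = j := by
  by_cases hi : i = 0 <;> by_cases hj : j = 0
  · omega
  · exfalso; exact hne _ (nodeWord_mem ws j (by omega) hj1) (by rw [← h]; simp [nodeWord, hi])
  · exfalso; exact hne _ (nodeWord_mem ws i (by omega) hi1) (by rw [h]; simp [nodeWord, hj])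
  · have hlt1 : (i - 1).toNat < ws.length := by omega
    have hlt2 : (j - 1).toNat < ws.length := by omega
    simp only [nodeWord, if_neg hi, if_neg hj, List.getD_eq_getElem _ _ hlt1,
      List.getD_eq_getElem _ _ hlt2] at h
    have := List.Nodup.getElem_inj_iff hnd (hi := hlt1) (hj := hlt2) |>.mp h
    omega

lemma nodeWord_append_of_le (ws : List (List Char)) (v : List Char) (i : Int)
    (h0 : 0 ≤ i) (h : i ≤ (ws.length : Int)) : nodeWord (ws ++ [v]) i = nodeWord ws i := by
  by_cases hi : i = 0
  · simp [nodeWord, hi]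
  · have hlt : (i - 1).toNat < ws.length := by omega
    simp only [nodeWord, if_neg hi]
    rw [List.getD_append _ _ _ _ hlt]

lemma nodeWord_append_last (ws : List (List Char)) (v : List Char) :
    nodeWord (ws ++ [v]) ((ws.length : Int) + 1) = v := by
  have hne : ((ws.length : Int) + 1) ≠ 0 := by omega
  have ht : (((ws.length : Int) + 1) - 1).toNat = ws.length := by omega
  simp only [nodeWord, if_neg hne, ht]
  rw [List.getD_eq_getElem _ _ (by simp)]
  exact List.getElem_concat_length rfl _

-- one step of the inner loop preserves the invariant and adds exactly cur ++ [ch] to the word set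
lemma altInner_step (d : PySem.Dict (Int × Char) Int) (ws : List (List Char)) (node : Int)
    (cur : List Char) (ch : Char) (hInv : TrieInv d ws) (h0 : 0 ≤ node)
    (h1 : node ≤ (ws.length : Int)) (hw : nodeWord ws node = cur) :
    ∃ d' ws' node',
      altInner (d, ws, (ws.length : Int) + 1, node, cur) ch
        = (d', ws', (ws'.length : Int) + 1, node', cur ++ [ch]) ∧
      TrieInv d' ws' ∧ 0 ≤ node' ∧ node' ≤ (ws'.length : Int) ∧
      nodeWord ws' node' = cur ++ [ch] ∧
      (∀ w, w ∈ ws' ↔ w ∈ ws ∨ w = cur ++ [ch]) := by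
  obtain ⟨hE, hND, hNE, hKey, hPar⟩ := hInv
  rcases hget : d.get? (node, ch) with _ | nxt
  · -- key absent: a new node is created
    refine ⟨d.insert (node, ch) ((ws.length : Int) + 1), ws ++ [cur ++ [ch]],
      (ws.length : Int) + 1, ?_, ?_, by omega, by simp, ?_, ?_⟩
    · simp only [altInner, hget]
      refine Prod.ext rfl (Prod.ext rfl (Prod.ext ?_ rfl))
      simp
    · have hnotmem : cur ++ [ch] ∉ ws := by
        have := (hKey node ch h0 h1).not
        simp [hget, hw] at this
        exact this
      constructor
      · -- edges
        intro p c j hj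
        rw [PySem.Dict.get?_insert] at hj
        by_cases hpc : (p, c) = (node, ch)
        · rw [if_pos hpc] at hj
          obtain ⟨hp, hc⟩ := Prod.mk.injEq .. ▸ hpc
          injection hj with hj
          subst hp hc
          refine ⟨h0, by simp; omega, by omega, by simp; omega, ?_⟩
          rw [← hj, nodeWord_append_last, nodeWord_append_of_le _ _ _ h0 h1, hw]
        · rw [if_neg hpc] at hj
          obtain ⟨hp0, hp1, hj1, hj2, hweq⟩ := hE p c j hj
          refine ⟨hp0, by simp; omega, hj1, by simp; omega, ?_⟩
          rw [nodeWord_append_of_le _ _ _ (by omega) hj2,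
            nodeWord_append_of_le _ _ _ hp0 hp1, hweq]
      refine ⟨by
        simp [List.nodup_append, hND]
        exact fun a ha h => hnotmem (h ▸ ha), ?_, ?_, ?_⟩
      · intro w hwmem
        rcases (List.mem_append.mp hwmem) with h | h
        · exact hNE w h
        · simp at h; subst h; simp
      · -- key characterisation
        intro p c hp0 hp1
        rw [PySem.Dict.get?_insert]
        by_cases hpc : (p, c) = (node, ch)
        · obtain ⟨hp, hc⟩ := Prod.mk.injEq .. ▸ hpc
          subst hp hc
          rw [if_pos rfl]
          simp [nodeWord_append_of_le _ _ _ hp0 h1, hw]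
        · rw [if_neg hpc]
          by_cases hple : p ≤ (ws.length : Int)
          · rw [nodeWord_append_of_le _ _ _ hp0 hple, hKey p c hp0 hple]
            constructor
            · intro h; exact List.mem_append.mpr (Or.inl h)
            · intro h
              rcases List.mem_append.mp h with h | h
              · exact h
              · exfalso
                simp at h
                obtain ⟨hweq, hceq⟩ := h
                rw [← hw] at hweq
                exact hpc (by
                  rw [nodeWord_inj ws hND hNE p node hp0 hple h0 h1 hweq, hceq])
          · -- p = ws.length + 1, the fresh node: no key from it yet, and no extension word exists
            have hp : p = (ws.length : Int) + 1 := by simp at hp1; omega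
            subst hp
            constructor
            · intro h
              rw [Option.isSome_iff_exists] at h
              obtain ⟨j, hj⟩ := h
              have := (hE _ _ _ hj).2.1
              omega
            · intro h
              exfalso
              rw [nodeWord_append_last] at h
              rcases List.mem_append.mp h with h | h
              · rcases hPar _ h with h2 | h2 <;>
                  rw [List.dropLast_concat] at h2
                · exact hnotmem h2
                · simp at h2
              · simp at h
      · -- parent closure
        intro w hwmem
        rcases List.mem_append.mp hwmem with h | h
        · rcases hPar w h with h2 | h2
          · exact Or.inl (List.mem_append.mpr (Or.inl h2))
          · exact Or.inr h2
        · simp at h; subst h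
          rw [List.dropLast_concat]
          by_cases hn : node = 0
          · right; rw [← hw]; simp [nodeWord, hn]
          · left
            exact List.mem_append.mpr (Or.inl (hw ▸ nodeWord_mem ws node (by omega) h1))
    · rw [nodeWord_append_last]
    · intro w; simp
  · -- key present: nothing changes except the walk position
    have hfacts := hE node ch nxt hget
    refine ⟨d, ws, nxt, ?_, ⟨hE, hND, hNE, hKey, hPar⟩, by omega, hfacts.2.2.2.1, ?_, ?_⟩
    · simp only [altInner, hget]
    · rw [hfacts.2.2.2.2, hw]
    · intro w
      constructor
      · exact fun h => Or.inl h
      · intro h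
        rcases h with h | h
        · exact h
        · subst h
          rw [← hw, ← hfacts.2.2.2.2]
          exact nodeWord_mem ws nxt hfacts.2.2.1 hfacts.2.2.2.1

-- folding the remaining characters t: invariant kept, word set grows by {cur ++ p | [] ≠ p <+: t}
lemma inner_spec (t : List Char) : ∀ (d : PySem.Dict (Int × Char) Int) (ws : List (List Char))
    (node : Int) (cur : List Char), TrieInv d ws → 0 ≤ node → node ≤ (ws.length : Int) →
    nodeWord ws node = cur →
    TrieInv (t.foldl altInner (d, ws, (ws.length : Int) + 1, node, cur)).1
      (t.foldl altInner (d, ws, (ws.length : Int) + 1, node, cur)).2.1 ∧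
    (t.foldl altInner (d, ws, (ws.length : Int) + 1, node, cur)).2.2.1
      = ((t.foldl altInner (d, ws, (ws.length : Int) + 1, node, cur)).2.1.length : Int) + 1 ∧
    (∀ w, w ∈ (t.foldl altInner (d, ws, (ws.length : Int) + 1, node, cur)).2.1 ↔
      w ∈ ws ∨ ∃ p, p ≠ [] ∧ p <+: t ∧ w = cur ++ p) := by
  induction t with
  | nil =>
    intro d ws node cur hInv h0 h1 hw
    simp only [List.foldl_nil]
    exact ⟨hInv, by simp, by simp⟩
  | cons ch t ih =>
    intro d ws node cur hInv h0 h1 hw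
    obtain ⟨d', ws', node', heq, hInv', h0', h1', hw', hmem'⟩ :=
      altInner_step d ws node cur ch hInv h0 h1 hw
    rw [List.foldl_cons, heq]
    obtain ⟨H1, H2, H3⟩ := ih d' ws' node' (cur ++ [ch]) hInv' h0' h1' hw'
    refine ⟨H1, H2, ?_⟩
    intro w
    rw [H3 w]
    constructor
    · rintro (h | ⟨p, hp, hpre, hweq⟩)
      · rcases (hmem' w).mp h with h2 | h2
        · exact Or.inl h2
        · exact Or.inr ⟨[ch], by simp, ⟨t, rfl⟩, h2⟩
      · refine Or.inr ⟨ch :: p, by simp, ?_, by simp [hweq]⟩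
        exact (List.cons_prefix_cons).mpr ⟨rfl, hpre⟩
    · rintro (h | ⟨p, hp, hpre, hweq⟩)
      · exact Or.inl ((hmem' w).mpr (Or.inl h))
      · rcases p with _ | ⟨a, p'⟩
        · exact absurd rfl hp
        · obtain ⟨ha, hpre'⟩ := List.cons_prefix_cons.mp hpre
          subst ha
          rcases p' with _ | ⟨b, p''⟩
          · exact Or.inl ((hmem' w).mpr (Or.inr (by simpa using hweq)))
          · exact Or.inr ⟨b :: p'', by simp, hpre', by simp [hweq]⟩

-- the outer loop over the first k start positions
def OuterPost (s : String) (k : Nat)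
    (R : PySem.Dict (Int × Char) Int × List (List Char) × Int) : Prop :=
  TrieInv R.1 R.2.1 ∧ R.2.2 = (R.2.1.length : Int) + 1 ∧
  (∀ w, w ∈ R.2.1 ↔ ∃ a, a < k ∧ w ≠ [] ∧ w <+: s.toList.drop a)

lemma outer_spec (s : String) (k : Nat) :
    OuterPost s k (((List.range k).map (fun a => Int.ofNat a)).foldl (outerF s)
      (PySem.Dict.empty, [], 1)) := by
  induction k with
  | zero =>
    simp [OuterPost, TrieInv, PySem.Dict.get?_empty]
  | succ k ih =>
    rw [List.range_succ, List.map_append, List.foldl_append]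
    obtain ⟨IH1, IH2, IH3⟩ := ih
    set R := ((List.range k).map (fun a => Int.ofNat a)).foldl (outerF s)
      (PySem.Dict.empty, [], 1) with hR
    simp only [List.map_cons, List.map_nil, List.foldl_cons, List.foldl_nil]
    have hslice : (PySem.Str.slice s (some ((k : Nat) : Int)) none).toList = s.toList.drop k := by
      simp [PySem.Str.slice, PySem.List.slice_from_natCast]
    have hstep := inner_spec (s.toList.drop k) R.1 R.2.1 0 [] IH1 (by omega) (by simp)
      (by simp [nodeWord])
    unfold outerF
    simp only [Int.ofNat_eq_natCast]
    rw [hslice, IH2]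
    obtain ⟨S1, S2, S3⟩ := hstep
    refine ⟨S1, S2, ?_⟩
    intro w
    simp only at S3 ⊢
    rw [S3 w, IH3 w]
    constructor
    · rintro (⟨a, ha, hne, hpre⟩ | ⟨p, hp, hpre, hweq⟩)
      · exact ⟨a, by omega, hne, hpre⟩
      · exact ⟨k, by omega, by simp [hweq, hp], by simpa [hweq] using hpre⟩
    · rintro ⟨a, ha, hne, hpre⟩
      by_cases hak : a < k
      · exact Or.inl ⟨a, hak, hne, hpre⟩
      · have : a = k := by omega
        subst this
        exact Or.inr ⟨w, hne, hpre, by simp⟩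

-- A-side: membership and nodup of the folded set
lemma mem_foldl_add {β : Type} (L : List β) (f : β → String) :
    ∀ (u : PySem.Set String) (x : String),
      x ∈ L.foldl (fun u b => u.add (f b)) u ↔ x ∈ u ∨ ∃ b ∈ L, x = f b := by
  induction L with
  | nil => simp
  | cons b L ih =>
    intro u x
    rw [List.foldl_cons, ih]
    simp [PySem.Set.mem_add]
    tauto

lemma nodup_foldl_add {β : Type} (L : List β) (f : β → String) :
    ∀ (u : PySem.Set String), u.Nodup → (L.foldl (fun u b => u.add (f b)) u).Nodup := by
  induction L with
  | nil => simp
  | cons b L ih => intro u hu; exact ih _ (PySem.Set.nodup_add _ _ hu)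

lemma mem_outer_fold (L : List Int) (g : Int → List Int) (f : Int → Int → String) :
    ∀ (u : PySem.Set String) (x : String),
      x ∈ L.foldl (fun u st => (g st).foldl (fun u en => u.add (f st en)) u) u ↔
        x ∈ u ∨ ∃ st ∈ L, ∃ en ∈ g st, x = f st en := by
  induction L with
  | nil => simp
  | cons b L ih =>
    intro u x
    rw [List.foldl_cons, ih, mem_foldl_add]
    simp [or_assoc]

lemma nodup_outer_fold (L : List Int) (g : Int → List Int) (f : Int → Int → String) :
    ∀ (u : PySem.Set String), u.Nodup →
      (L.foldl (fun u st => (g st).foldl (fun u en => u.add (f st en)) u) u).Nodup := by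
  induction L with
  | nil => simp
  | cons b L ih => intro u hu; exact ih _ (nodup_foldl_add _ _ _ hu)

-- the substrings named by A's index pairs are exactly the nonempty prefixes of suffixes
lemma slice_pairs_iff (s : String) (x : String) :
    ((∃ st ∈ PySem.List.pyRange 0 (PySem.Str.len s),
        ∃ en ∈ PySem.List.pyRange (st + 1) (PySem.Str.len s + 1),
          x = PySem.Str.slice s (some st) (some en)) ↔
      ∃ w, (w ≠ [] ∧ ∃ a, w <+: s.toList.drop a) ∧ x = String.ofList w) := by
  have hlen : PySem.Str.len s = (s.toList.length : Int) := PySem.Str.len_eq s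
  constructor
  · rintro ⟨st, hst, en, hen, hx⟩
    rw [PySem.List.mem_pyRange_one] at hst hen
    have hst0 : 0 ≤ st := hst.1
    have hen0 : 0 ≤ en := by omega
    refine ⟨(s.toList.drop st.toNat).take (en.toNat - st.toNat), ⟨?_, st.toNat, List.take_prefix _ _⟩, ?_⟩
    · apply List.ne_nil_of_length_pos
      rw [List.length_take, List.length_drop]
      omega
    · rw [hx]
      show String.ofList (PySem.Chars.slice s.toList (some st) (some en)) = _
      rw [show PySem.Chars.slice s.toList (some st) (some en)
          = PySem.List.slice s.toList (some st) (some en) from rfl,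
        PySem.List.slice_toNat _ hst0 hen0]
  · rintro ⟨w, ⟨hne, a, hpre⟩, hx⟩
    have halen : a < s.toList.length := by
      by_contra h
      rw [List.drop_eq_nil_of_le (by omega)] at hpre
      exact hne (List.prefix_nil.mp hpre)
    have hwlen : w.length ≤ s.toList.length - a := by
      have := hpre.length_le
      rw [List.length_drop] at this
      omega
    refine ⟨(a : Int), ?_, (a : Int) + (w.length : Int), ?_, ?_⟩
    · rw [PySem.List.mem_pyRange_one]
      constructor
      · omega
      · omega
    · rw [PySem.List.mem_pyRange_one]
      constructor
      · have : 1 ≤ w.length := List.length_pos_iff.mpr hne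
        omega
      · omega
    · rw [hx]
      show _ = String.ofList (PySem.Chars.slice s.toList _ _)
      rw [show PySem.Chars.slice s.toList (some ((a:Int))) (some ((a:Int) + (w.length:Int)))
          = PySem.List.slice s.toList (some ((a:Int))) (some ((a:Int) + (w.length:Int))) from rfl,
        PySem.List.slice_toNat _ (by omega) (by omega)]
      congr 1
      have := List.prefix_iff_eq_take.mp hpre
      rw [show ((a:Int) + (w.length:Int)).toNat - (a:Int).toNat = w.length by omega,
        show ((a:Int)).toNat = a by omega]
      exact this

-- ===== VERDICT =====
theorem find_unique_substrings_spec : Claim_equal_find_unique_substrings := by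
  intro s _
  unfold Spec_find_unique_substrings find_unique_substrings find_unique_substrings_alt
  by_cases hnil : s.toList = []
  · simp [hnil]
  · simp only [if_neg hnil]
    have hrange : PySem.List.pyRange 0 (PySem.Str.len s)
        = (List.range s.toList.length).map (fun a => Int.ofNat a) := by
      rw [PySem.List.pyRange_one, PySem.Str.len_eq]
      simp
    have hpost := outer_spec s s.toList.length
    rw [← hrange] at hpost
    obtain ⟨⟨_, hND, _, _, _⟩, _, hmem⟩ := hpost
    have hinj : Function.Injective String.ofList := fun a b h => by
      have := congrArg String.toList h; simpa using this
    apply PySem.List.sorted_eq_sorted_of_perm _ _ _ (fun a b h => h)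
    rw [List.perm_ext_iff_of_nodup
      (nodup_outer_fold _ _ _ PySem.Set.empty List.nodup_nil) (List.Nodup.map hinj hND)]
    intro x
    rw [mem_outer_fold (PySem.List.pyRange 0 (PySem.Str.len s))
      (fun st => PySem.List.pyRange (st + 1) (PySem.Str.len s + 1))
      (fun st en => PySem.Str.slice s (some st) (some en)) PySem.Set.empty x]
    have hempty : x ∈ (PySem.Set.empty : PySem.Set String) ↔ False := by
      simp [PySem.Set.empty]
    rw [hempty, false_or, slice_pairs_iff]
    simp only [List.mem_map]
    constructor
    · rintro ⟨w, ⟨hne, a, hpre⟩, hx⟩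
      have halen : a < s.toList.length := by
        by_contra h
        rw [List.drop_eq_nil_of_le (by omega)] at hpre
        exact hne (List.prefix_nil.mp hpre)
      refine ⟨w, ?_, hx.symm⟩
      rw [hmem w]
      exact ⟨a, halen, hne, hpre⟩
    · rintro ⟨w, hwmem, hx⟩
      rw [hmem w] at hwmem
      obtain ⟨a, _, hne, hpre⟩ := hwmem
      exact ⟨w, ⟨hne, a, hpre⟩, hx.symm⟩
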